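-- pv_equiv track=rewrite | github.com/percy-raskova/dremeldocs | scripts/theme_classifier.py | _categorize_thread
-- ===== SOURCE A (Python) =====
-- from typing import Any, Dict, List, Optional, Tuple, TypedDict
--
-- def _categorize_thread(themes: List[str]) -> str:
--     """Categorize thread based on detected themes"""
--     if not themes:
--         return "other"
--
--     # Updated to match actual parsed themes from THEMES_EXTRACTED.md
--     philosophical_themes = {
--         "epistemology",
--         "ontology",
--         "phenomenology",
--         "ethics",
--         "dialectics",
--         "metaphysics",
--         "philosophy of mind",
--     }
--
--     political_themes = {
--         "marxism",
--         "anarchism",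
--         "fascism",
--         "imperialism",
--         "political economy",
--         "class analysis",
--         "colonialism",
--         # Add variations from parsed themes
--         "marxism_historical materialism",
--         "fascism analysis",
--         "imperialism_colonialism",
--         "covid_public health politics",
--         "organizational theory",
--         "cultural criticism",
--     }
--
--     # Check themes using normalized comparison
--     has_philosophy = any(
--         t.lower().replace("/", "_") in philosophical_themes
--         or "dialectic" in t.lower()
--         or "philosophy" in t.lower()
--         for t in themes
--     )
--
--     has_politics = any(
--         t.lower().replace("/", "_") in political_themes
--         or "marxis" in t.lower()
--         or "fascis" in t.lower()
--         or "politic" in t.lower()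
--         or "imperial" in t.lower()
--         or "colonial" in t.lower()
--         or "economy" in t.lower()
--         for t in themes
--     )
--
--     if has_philosophy and has_politics:
--         return "both"
--     elif has_philosophy:
--         return "philosophical"
--     elif has_politics:
--         return "political"
--     elif themes:
--         return "uncertain"
--     else:
--         return "other"
-- ===== SOURCE B (Python) =====
-- PHILOSOPHICAL_THEMES = {
--     "epistemology", "ontology", "phenomenology", "ethics",
--     "dialectics", "metaphysics", "philosophy of mind",
-- }
-- POLITICAL_THEMES = {
--     "marxism", "anarchism", "fascism", "imperialism",
--     "political economy", "class analysis", "colonialism",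
--     "marxism_historical materialism", "fascism analysis",
--     "imperialism_colonialism", "covid_public health politics",
--     "organizational theory", "cultural criticism",
-- }
--
-- _CATEGORY_TABLE = ("uncertain", "philosophical", "political", "both")
--
--
-- def _theme_mask(t):
--     """2-bit mask for one theme: bit 0 = philosophical, bit 1 = political."""
--     low = t.lower()
--     norm = low.replace("/", "_")
--     mask = 0
--     if (norm in PHILOSOPHICAL_THEMES
--             or "dialectic" in low
--             or "philosophy" in low):
--         mask |= 1
--     if (norm in POLITICAL_THEMES
--             or "marxis" in low
--             or "fascis" in low
--             or "politic" in low
--             or "imperial" in low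
--             or "colonial" in low
--             or "economy" in low):
--         mask |= 2
--     return mask
--
--
-- def _categorize_thread(themes):
--     """Categorize thread: OR together per-theme bitmasks, read answer from a table."""
--     if not themes:
--         return "other"
--     mask = 0
--     for t in themes:
--         mask |= _theme_mask(t)
--     return _CATEGORY_TABLE[mask]
-- ===== Notes on version B (the rewrite author's own statement) =====
-- stated objective: faster
-- what changed: Replaces A's two boolean any(...) passes and four-way elif chain with a per-theme 2-bit mask (bit 0 philosophical, bit 1 political) OR-folded over the list once, the result read from a 4-entry category table indexed by the mask.
import Mathlib
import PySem

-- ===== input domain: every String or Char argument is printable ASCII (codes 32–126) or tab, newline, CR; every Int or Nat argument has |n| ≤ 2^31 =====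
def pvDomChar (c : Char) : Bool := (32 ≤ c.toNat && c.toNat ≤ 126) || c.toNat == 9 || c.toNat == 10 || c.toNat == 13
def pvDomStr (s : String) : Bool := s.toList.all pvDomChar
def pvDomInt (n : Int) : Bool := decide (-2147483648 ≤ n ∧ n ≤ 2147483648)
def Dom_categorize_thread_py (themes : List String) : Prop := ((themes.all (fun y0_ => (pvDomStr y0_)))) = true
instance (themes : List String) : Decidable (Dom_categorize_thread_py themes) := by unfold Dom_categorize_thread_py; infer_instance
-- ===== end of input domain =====

-- B replaces A's two any(...) passes and elif chain with an OR-fold of per-theme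
-- 2-bit masks and a 4-entry category table indexed by the final mask (alternative decomposition).


-- ===== PORT A =====
def pvPhilosophicalThemes : PySem.Set String := PySem.Set.ofList
  ["epistemology", "ontology", "phenomenology", "ethics",
   "dialectics", "metaphysics", "philosophy of mind"]

def pvPoliticalThemes : PySem.Set String := PySem.Set.ofList
  ["marxism", "anarchism", "fascism", "imperialism",
   "political economy", "class analysis", "colonialism",
   "marxism_historical materialism", "fascism analysis",
   "imperialism_colonialism", "covid_public health politics",
   "organizational theory", "cultural criticism"]

def categorize_thread_py (themes : List String) : String :=
  if themes = [] then "other"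
  else
    let has_philosophy := themes.any (fun t =>
      PySem.Set.contains pvPhilosophicalThemes
        (PySem.Str.replace (PySem.Str.lower t) "/" "_")
      || PySem.Str.isIn "dialectic" (PySem.Str.lower t)
      || PySem.Str.isIn "philosophy" (PySem.Str.lower t))
    let has_politics := themes.any (fun t =>
      PySem.Set.contains pvPoliticalThemes
        (PySem.Str.replace (PySem.Str.lower t) "/" "_")
      || PySem.Str.isIn "marxis" (PySem.Str.lower t)
      || PySem.Str.isIn "fascis" (PySem.Str.lower t)
      || PySem.Str.isIn "politic" (PySem.Str.lower t)
      || PySem.Str.isIn "imperial" (PySem.Str.lower t)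
      || PySem.Str.isIn "colonial" (PySem.Str.lower t)
      || PySem.Str.isIn "economy" (PySem.Str.lower t))
    if has_philosophy && has_politics then "both"
    else if has_philosophy then "philosophical"
    else if has_politics then "political"
    else if themes ≠ [] then "uncertain"
    else "other"

-- ===== PORT B =====
def pvCategoryTable : List String := ["uncertain", "philosophical", "political", "both"]

-- 2-bit mask for one theme: bit 0 = philosophical, bit 1 = political
def pvThemeMask (t : String) : Nat :=
  let low := PySem.Str.lower t
  let norm := PySem.Str.replace low "/" "_"
  let m0 : Nat := 0
  let m1 := if PySem.Set.contains pvPhilosophicalThemes norm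
               || PySem.Str.isIn "dialectic" low
               || PySem.Str.isIn "philosophy" low
            then m0 ||| 1 else m0
  if PySem.Set.contains pvPoliticalThemes norm
     || PySem.Str.isIn "marxis" low
     || PySem.Str.isIn "fascis" low
     || PySem.Str.isIn "politic" low
     || PySem.Str.isIn "imperial" low
     || PySem.Str.isIn "colonial" low
     || PySem.Str.isIn "economy" low
  then m1 ||| 2 else m1

def categorize_thread_py_alt (themes : List String) : String :=
  if themes = [] then "other"
  else
    let mask := themes.foldl (fun m t => m ||| pvThemeMask t) 0
    pvCategoryTable.getD mask ""   -- mask < 4 always, so the lookup is total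

-- ===== PRECONDITION & SPEC =====
def Spec_categorize_thread_py (themes : List String) (out : String) : Prop := out = categorize_thread_py_alt themes
instance (themes : List String) (out : String) : Decidable (Spec_categorize_thread_py themes out) := by unfold Spec_categorize_thread_py; infer_instance

-- ===== CLAIM (what is proved, stated in full; the proofs are below) =====
def Claim_equal_categorize_thread_py : Prop := ∀ (themes : List String), Dom_categorize_thread_py themes → Spec_categorize_thread_py themes (categorize_thread_py themes)

-- ===== LEMMAS AND PROOFS =====

def pvPhilPred (t : String) : Bool :=
  PySem.Set.contains pvPhilosophicalThemes (PySem.Str.replace (PySem.Str.lower t) "/" "_")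
  || PySem.Str.isIn "dialectic" (PySem.Str.lower t)
  || PySem.Str.isIn "philosophy" (PySem.Str.lower t)

def pvPolPred (t : String) : Bool :=
  PySem.Set.contains pvPoliticalThemes (PySem.Str.replace (PySem.Str.lower t) "/" "_")
  || PySem.Str.isIn "marxis" (PySem.Str.lower t)
  || PySem.Str.isIn "fascis" (PySem.Str.lower t)
  || PySem.Str.isIn "politic" (PySem.Str.lower t)
  || PySem.Str.isIn "imperial" (PySem.Str.lower t)
  || PySem.Str.isIn "colonial" (PySem.Str.lower t)
  || PySem.Str.isIn "economy" (PySem.Str.lower t)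

def pvMaskOf (p q : Bool) : Nat := (if p then 1 else 0) ||| (if q then 2 else 0)

lemma pvThemeMask_eq (t : String) : pvThemeMask t = pvMaskOf (pvPhilPred t) (pvPolPred t) := by
  unfold pvThemeMask pvMaskOf pvPhilPred pvPolPred
  cases hp : (PySem.Set.contains pvPhilosophicalThemes (PySem.Str.replace (PySem.Str.lower t) "/" "_")
      || PySem.Str.isIn "dialectic" (PySem.Str.lower t)
      || PySem.Str.isIn "philosophy" (PySem.Str.lower t)) <;>
  cases hq : (PySem.Set.contains pvPoliticalThemes (PySem.Str.replace (PySem.Str.lower t) "/" "_")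
      || PySem.Str.isIn "marxis" (PySem.Str.lower t)
      || PySem.Str.isIn "fascis" (PySem.Str.lower t)
      || PySem.Str.isIn "politic" (PySem.Str.lower t)
      || PySem.Str.isIn "imperial" (PySem.Str.lower t)
      || PySem.Str.isIn "colonial" (PySem.Str.lower t)
      || PySem.Str.isIn "economy" (PySem.Str.lower t)) <;>
  simp only [hp, hq, if_true, if_false] <;> rfl

lemma pvMaskOf_or (p q p' q' : Bool) :
    pvMaskOf p q ||| pvMaskOf p' q' = pvMaskOf (p || p') (q || q') := by
  cases p <;> cases q <;> cases p' <;> cases q' <;> decide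

lemma pvFold_eq (l : List String) (p q : Bool) :
    l.foldl (fun m t => m ||| pvThemeMask t) (pvMaskOf p q)
      = pvMaskOf (p || l.any pvPhilPred) (q || l.any pvPolPred) := by
  induction l generalizing p q with
  | nil => simp
  | cons t rest ih =>
    simp only [List.foldl_cons, List.any_cons]
    rw [pvThemeMask_eq, pvMaskOf_or, ih]
    simp [Bool.or_assoc]

-- ===== VERDICT (by name: the statement is the Claim_ definition above) =====
theorem categorize_thread_py_spec : Claim_equal_categorize_thread_py := by
  intro themes _
  unfold Spec_categorize_thread_py
  cases themes with
  | nil => rfl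
  | cons t rest =>
    unfold categorize_thread_py categorize_thread_py_alt
    rw [if_neg (List.cons_ne_nil t rest), if_neg (List.cons_ne_nil t rest)]
    have h0 : pvMaskOf false false = 0 := rfl
    rw [← h0, pvFold_eq]
    simp only [Bool.false_or]
    have hphil : ((t :: rest).any (fun s =>
        PySem.Set.contains pvPhilosophicalThemes (PySem.Str.replace (PySem.Str.lower s) "/" "_")
        || PySem.Str.isIn "dialectic" (PySem.Str.lower s)
        || PySem.Str.isIn "philosophy" (PySem.Str.lower s))) = (t :: rest).any pvPhilPred := rfl
    have hpol : ((t :: rest).any (fun s =>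
        PySem.Set.contains pvPoliticalThemes (PySem.Str.replace (PySem.Str.lower s) "/" "_")
        || PySem.Str.isIn "marxis" (PySem.Str.lower s)
        || PySem.Str.isIn "fascis" (PySem.Str.lower s)
        || PySem.Str.isIn "politic" (PySem.Str.lower s)
        || PySem.Str.isIn "imperial" (PySem.Str.lower s)
        || PySem.Str.isIn "colonial" (PySem.Str.lower s)
        || PySem.Str.isIn "economy" (PySem.Str.lower s))) = (t :: rest).any pvPolPred := rfl
    rw [hphil, hpol]
    cases (t :: rest).any pvPhilPred <;> cases (t :: rest).any pvPolPred <;>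
      simp [pvMaskOf, pvCategoryTable]
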